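-- pv_equiv track=rewrite | github.com/Martinj-31/CodingTest | 프로그래머스/1/42840. 모의고사/모의고사.py | solution
-- ===== SOURCE A (Python) =====
-- def solution(answers):
--     answer = []
--     man1, man2, man3 = 0, 0, 0
--     man1_rule = [1, 2, 3, 4, 5]
--     man2_rule = [2, 1, 2, 3, 2, 4, 2, 5]
--     man3_rule = [3, 3, 1, 1, 2, 2, 4, 4, 5, 5]
--
--     for i in range(len(answers)):
--         if answers[i] == man1_rule[i%len(man1_rule)]:
--             man1 += 1
--         if answers[i] == man2_rule[i%len(man2_rule)]:
--             man2 += 1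
--         if answers[i] == man3_rule[i%len(man3_rule)]:
--             man3 += 1
--     arr = [man1, man2, man3]
--     max_num = max(arr)
--     for i in range(len(arr)):
--         if max_num <= arr[i]:
--             max_num = arr[i]
--             answer.append(i + 1)
--     return answer
-- ===== SOURCE B (Python) =====
-- def solution(answers):
--     patterns = [[1, 2, 3, 4, 5],
--                 [2, 1, 2, 3, 2, 4, 2, 5],
--                 [3, 3, 1, 1, 2, 2, 4, 4, 5, 5]]
--     # Hash aggregation: one pass tallies (position mod 40, answer) pairs
--     # (40 = lcm of the pattern lengths), then each score is read off the
--     # table with 40 lookups instead of comparing every answer per pattern.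
--     cnt = {}
--     for i, a in enumerate(answers):
--         k = (i % 40, a)
--         cnt[k] = cnt.get(k, 0) + 1
--     scores = [sum(cnt.get((r, pat[r % len(pat)]), 0) for r in range(40))
--               for pat in patterns]
--     best = max(scores)
--     return [i + 1 for i, s in enumerate(scores) if s == best]
-- ===== Notes on version B (the rewrite author's own statement) =====
-- stated objective: alternative
-- what changed: A compares every answer against all three cycled patterns in one interleaved loop with three accumulators; B instead builds a hash table counting (index mod 40, answer) pairs in a single tally pass (40 = lcm of the pattern lengths) and then reads each score off the table with 40 lookups, so no per-pattern comparison over the answers happens at all.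
import Mathlib
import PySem

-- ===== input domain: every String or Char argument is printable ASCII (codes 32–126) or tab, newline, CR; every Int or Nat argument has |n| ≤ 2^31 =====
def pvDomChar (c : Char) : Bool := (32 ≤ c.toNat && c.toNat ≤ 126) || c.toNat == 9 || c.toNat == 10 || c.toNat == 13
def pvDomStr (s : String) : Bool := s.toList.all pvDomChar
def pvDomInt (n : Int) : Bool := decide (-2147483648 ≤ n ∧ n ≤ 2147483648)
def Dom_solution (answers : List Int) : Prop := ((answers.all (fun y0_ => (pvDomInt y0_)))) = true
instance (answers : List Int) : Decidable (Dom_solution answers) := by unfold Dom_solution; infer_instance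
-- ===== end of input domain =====

-- B replaces A's per-pattern comparisons with a hash aggregation: one pass tallies
-- (index mod 40, answer) pairs (40 = lcm of the pattern lengths), then each score
-- is read off that table with 40 lookups (alternative decomposition; same cost).

-- ===== PORT A =====
-- A's for-loop over range(len(answers)): each step reads answers[i] (the current element)
-- and the three rule entries at i mod the rule lengths, bumping three counters.
def solLoopA : List Int → Nat → Int → Int → Int → Int × Int × Int
  | [], _, m1, m2, m3 => (m1, m2, m3)
  | a :: rest, i, m1, m2, m3 =>
    solLoopA rest (i + 1)
      (if a = ([1, 2, 3, 4, 5] : List Int).getD (i % 5) 0 then m1 + 1 else m1)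
      (if a = ([2, 1, 2, 3, 2, 4, 2, 5] : List Int).getD (i % 8) 0 then m2 + 1 else m2)
      (if a = ([3, 3, 1, 1, 2, 2, 4, 4, 5, 5] : List Int).getD (i % 10) 0 then m3 + 1 else m3)

def solution (answers : List Int) : List Int :=
  let t := solLoopA answers 0 0 0 0
  let arr : List Int := [t.1, t.2.1, t.2.2]
  let max0 := (PySem.List.max? arr (fun x => x)).getD 0
  -- second loop: for i in range(len(arr)): if max_num <= arr[i]: max_num = arr[i]; answer.append(i+1)
  let res := (List.range arr.length).foldl
    (fun (st : Int × List Int) i =>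
      if st.1 ≤ arr.getD i 0 then (arr.getD i 0, st.2 ++ [(i : Int) + 1]) else st)
    (max0, [])
  res.2

-- ===== PORT B =====
-- for i, a in enumerate(answers): k = (i % 40, a); cnt[k] = cnt.get(k, 0) + 1
def tally (answers : List Int) : PySem.Dict (Int × Int) Int :=
  (PySem.List.enumerate answers).foldl
    (fun d ia => d.modify (PySem.Int.mod ia.1 40, ia.2) 0 (fun c => c + 1))
    PySem.Dict.empty

-- sum(cnt.get((r, pat[r % len(pat)]), 0) for r in range(40))
def tableScore (cnt : PySem.Dict (Int × Int) Int) (pat : List Int) : Int :=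
  (PySem.List.pyRange 0 40 1).foldl
    (fun acc r => acc + cnt.getD (r, PySem.List.pyGetD pat (PySem.Int.mod r (pat.length : Int)) 0) 0)
    0

def solution_alt (answers : List Int) : List Int :=
  let patterns : List (List Int) :=
    [[1, 2, 3, 4, 5], [2, 1, 2, 3, 2, 4, 2, 5], [3, 3, 1, 1, 2, 2, 4, 4, 5, 5]]
  let cnt := tally answers
  let scores := patterns.map (tableScore cnt)
  let best := (PySem.List.max? scores (fun x => x)).getD 0
  (PySem.List.enumerate scores).filterMap
    (fun is => if is.2 = best then some (is.1 + 1) else none)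

-- ===== PRECONDITION & SPEC =====
def Spec_solution (answers : List Int) (out : List Int) : Prop := out = solution_alt answers
instance (answers : List Int) (out : List Int) : Decidable (Spec_solution answers out) := by unfold Spec_solution; infer_instance

-- ===== CLAIM (what is proved, stated in full; the proofs are below) =====
def Claim_equal_solution : Prop := ∀ (answers : List Int), Dom_solution answers → Spec_solution answers (solution answers)

-- ===== LEMMAS AND PROOFS =====

/-- common spec: count of positions matching the cycled pattern, starting at index k -/
def cyc (pat : List Int) : List Int → Nat → Int
  | [], _ => 0
  | a :: rest, k => (if a = pat.getD (k % pat.length) 0 then 1 else 0) + cyc pat rest (k + 1)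

theorem solLoopA_eq (l : List Int) : ∀ (i : Nat) (m1 m2 m3 : Int),
    solLoopA l i m1 m2 m3 =
      (m1 + cyc [1,2,3,4,5] l i, m2 + cyc [2,1,2,3,2,4,2,5] l i, m3 + cyc [3,3,1,1,2,2,4,4,5,5] l i) := by
  induction l with
  | nil => intro i m1 m2 m3; simp [solLoopA, cyc]
  | cons a rest ih =>
    intro i m1 m2 m3
    simp only [solLoopA, cyc, ih, Prod.mk.injEq,
      show ([1,2,3,4,5] : List Int).length = 5 from rfl,
      show ([2,1,2,3,2,4,2,5] : List Int).length = 8 from rfl,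
      show ([3,3,1,1,2,2,4,4,5,5] : List Int).length = 10 from rfl]
    refine ⟨?_, ?_, ?_⟩ <;> (split_ifs <;> ring)

/-- the key stream B tallies: (index mod 40, element), indices starting at k -/
def keys (l : List Int) (k : Nat) : List (Int × Int) :=
  (PySem.List.enumerate l (k : Int)).map (fun ia => (PySem.Int.mod ia.1 40, ia.2))

/-- the table entry B reads for residue r of pattern pat -/
def fpat (pat : List Int) (r : Int) : Int :=
  PySem.List.pyGetD pat (PySem.Int.mod r (pat.length : Int)) 0

theorem foldl_modify_key :
    ∀ (l : List (Int × Int)) (d : PySem.Dict (Int × Int) Int),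
      l.foldl (fun d ia => d.modify (PySem.Int.mod ia.1 40, ia.2) 0 (fun c => c + 1)) d
        = (l.map (fun ia => (PySem.Int.mod ia.1 40, ia.2))).foldl
            (fun d x => d.modify x 0 (fun c => c + 1)) d := by
  intro l
  induction l with
  | nil => intro d; simp
  | cons x rest ih =>
    intro d
    simp only [List.foldl_cons, List.map_cons]
    exact ih _

theorem tally_getD (answers : List Int) (x : Int × Int) :
    (tally answers).getD x 0 = (keys answers 0).count x := by
  unfold tally keys
  rw [foldl_modify_key]
  rw [PySem.Dict.getD_foldl_modify_add_one, PySem.Dict.getD_empty]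
  simp

theorem foldl_add_eq_sum (g : Int → Int) : ∀ (rs : List Int) (acc : Int),
    rs.foldl (fun a r => a + g r) acc = acc + (rs.map g).sum := by
  intro rs
  induction rs with
  | nil => intro acc; simp
  | cons r rest ih => intro acc; simp [ih]; ring

theorem ind_sum_zero (f : Int → Int) (m a : Int) : ∀ (rs : List Int), m ∉ rs →
    (rs.map (fun r => if ((m, a) : Int × Int) = (r, f r) then (1 : Int) else 0)).sum = 0 := by
  intro rs
  induction rs with
  | nil => intro _; simp
  | cons r rest ih =>
    intro hm
    simp only [List.mem_cons, not_or] at hm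
    simp only [List.map_cons, List.sum_cons]
    rw [if_neg (fun h => hm.1 (congrArg Prod.fst h)), ih hm.2]
    ring

theorem ind_sum (f : Int → Int) (m a : Int) : ∀ (rs : List Int), rs.Nodup → m ∈ rs →
    (rs.map (fun r => if ((m, a) : Int × Int) = (r, f r) then (1 : Int) else 0)).sum
      = if a = f m then 1 else 0 := by
  intro rs
  induction rs with
  | nil => intro _ hm; simp at hm
  | cons r rest ih =>
    intro hnd hm
    rcases List.nodup_cons.mp hnd with ⟨hr, hnd'⟩
    by_cases hrm : r = m
    · subst hrm
      rw [List.map_cons, List.sum_cons, ind_sum_zero f r a rest hr]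
      simp [Prod.ext_iff]
    · have hm' : m ∈ rest := by
        rcases List.mem_cons.mp hm with h | h
        · exact absurd h.symm hrm
        · exact h
      simp only [List.map_cons, List.sum_cons]
      rw [if_neg (fun h => hrm (congrArg Prod.fst h).symm), ih hnd' hm', zero_add]

theorem count_sum_eq_cyc (pat : List Int) (hdvd : pat.length ∣ 40) :
    ∀ (l : List Int) (k : Nat),
      ((PySem.List.pyRange 0 40 1).map
        (fun r => ((keys l k).count (r, fpat pat r) : Int))).sum = cyc pat l k := by
  intro l
  induction l with
  | nil => intro k; simp [keys, cyc, PySem.List.enumerate]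
  | cons a rest ih =>
    intro k
    have hkeys : keys (a :: rest) k = (((k % 40 : Nat) : Int), a) :: keys rest (k + 1) := by
      simp only [keys, PySem.List.enumerate_cons, List.map_cons]
      have h1 : PySem.Int.mod (k : Int) 40 = ((k % 40 : Nat) : Int) := by
        simp [PySem.Int.mod, Int.fmod_eq_emod]
      have h2 : ((k : Int) + 1) = (((k + 1 : Nat)) : Int) := by push_cast; ring
      rw [h1, h2]
    rw [hkeys]
    have hsplit : ∀ r : Int,
        (((((k % 40 : Nat) : Int), a) :: keys rest (k + 1)).count (r, fpat pat r) : Int)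
          = ((keys rest (k + 1)).count (r, fpat pat r) : Int)
            + (if (((k % 40 : Nat) : Int), a) = (r, fpat pat r) then (1 : Int) else 0) := by
      intro r
      rw [List.count_cons]
      split_ifs with h h2 h3
      · push_cast; ring
      · exact absurd (beq_iff_eq.mpr h) (by simpa using h2)
      · exact absurd (beq_iff_eq.mp (by simpa using h3)) h
      · push_cast; ring
    calc ((PySem.List.pyRange 0 40 1).map
            (fun r => (((((k % 40 : Nat) : Int), a) :: keys rest (k + 1)).count (r, fpat pat r) : Int))).sum
        = ((PySem.List.pyRange 0 40 1).map
            (fun r => ((keys rest (k + 1)).count (r, fpat pat r) : Int))).sum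
          + ((PySem.List.pyRange 0 40 1).map
            (fun r => if (((k % 40 : Nat) : Int), a) = (r, fpat pat r) then (1 : Int) else 0)).sum := by
          simp only [hsplit]
          rw [← List.sum_map_add]
      _ = cyc pat rest (k + 1) + (if a = pat.getD (k % pat.length) 0 then 1 else 0) := by
          rw [ih (k + 1)]
          congr 1
          rw [ind_sum (fpat pat) ((k % 40 : Nat) : Int) a (PySem.List.pyRange 0 40 1)
                (by decide)
                (PySem.List.mem_pyRange_one.mpr ⟨by omega, by omega⟩)]
          have : fpat pat ((k % 40 : Nat) : Int) = pat.getD (k % pat.length) 0 := by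
            unfold fpat
            have h1 : PySem.Int.mod ((k % 40 : Nat) : Int) (pat.length : Int)
                = ((k % pat.length : Nat) : Int) := by
              simp [PySem.Int.mod, Int.fmod_eq_emod]
              exact Int.emod_emod_of_dvd _ (by exact_mod_cast hdvd)
            rw [h1, PySem.List.pyGetD_natCast]
          rw [this]
      _ = cyc pat (a :: rest) k := by simp [cyc]; ring

theorem tableScore_eq (pat : List Int) (hdvd : pat.length ∣ 40)
    (answers : List Int) : tableScore (tally answers) pat = cyc pat answers 0 := by
  unfold tableScore
  rw [foldl_add_eq_sum (fun r => (tally answers).getD (r, PySem.List.pyGetD pat (PySem.Int.mod r (pat.length : Int)) 0) 0)]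
  rw [zero_add]
  rw [← count_sum_eq_cyc pat hdvd answers 0]
  refine congrArg List.sum (List.map_congr_left fun r _ => ?_)
  simpa [fpat] using tally_getD answers (r, fpat pat r)

/-- the selection step: A's mutating max-collect loop equals B's enumerate filter,
    for any three scores. -/
theorem select_eq (a b c : Int) :
    (let arr : List Int := [a, b, c]
     let max0 := (PySem.List.max? arr (fun x => x)).getD 0
     ((List.range arr.length).foldl
        (fun (st : Int × List Int) i =>
          if st.1 ≤ arr.getD i 0 then (arr.getD i 0, st.2 ++ [(i : Int) + 1]) else st)
        (max0, [])).2)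
    = (let m := (PySem.List.max? ([a, b, c] : List Int) (fun x => x)).getD 0
       (PySem.List.enumerate ([a, b, c] : List Int)).filterMap
         (fun is => if is.2 = m then some (is.1 + 1) else none)) := by
  simp only [PySem.List.max?_id_cons, List.foldl_cons, List.foldl_nil, Option.getD_some,
    List.length_cons, List.length_nil, List.range_succ, List.range_zero, List.nil_append,
    List.append_assoc,
    PySem.List.enumerate_cons, PySem.List.enumerate_nil, List.filterMap_cons, List.filterMap_nil]
  rcases le_total a b with h1 | h1 <;> rcases le_total b c with h2 | h2 <;>
    rcases le_total a c with h3 | h3 <;>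
    simp [h1, h2, h3] <;>
    split_ifs <;> simp_all <;> omega

-- ===== VERDICT (by name: the statement is the Claim_ definition above) =====
theorem solution_spec : Claim_equal_solution := by
  intro answers _
  unfold Spec_solution solution solution_alt
  simp only [List.map_cons, List.map_nil]
  rw [solLoopA_eq]
  simp only [tableScore_eq [1,2,3,4,5] (by decide) answers,
      tableScore_eq [2,1,2,3,2,4,2,5] (by decide) answers,
      tableScore_eq [3,3,1,1,2,2,4,4,5,5] (by decide) answers]
  simpa using select_eq (0 + cyc [1,2,3,4,5] answers 0) (0 + cyc [2,1,2,3,2,4,2,5] answers 0)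
    (0 + cyc [3,3,1,1,2,2,4,4,5,5] answers 0)
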